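-- pv_equiv track=rewrite | github.com/amirbiron/CodeBot | services/feature_flags_service.py | _normalize_flag_name_for_env
-- ===== SOURCE A (Python) =====
-- def _normalize_flag_name_for_env(flag_name: str) -> str:
--     # Normalize to env-var-friendly token: uppercase + underscores only.
--     s = str(flag_name or "").strip().upper()
--     out = []
--     for ch in s:
--         if ("A" <= ch <= "Z") or ("0" <= ch <= "9"):
--             out.append(ch)
--         else:
--             out.append("_")
--     # Collapse multiple underscores
--     normalized = "".join(out)
--     while "__" in normalized:
--         normalized = normalized.replace("__", "_")
--     return normalized.strip("_")
-- ===== SOURCE B (Python) =====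
-- def _normalize_flag_name_for_env(flag_name: str) -> str:
--     # One fused pass: keep A-Z/0-9, emit a single '_' per run of other chars,
--     # never emit a leading '_'; then only the trailing '_' needs stripping.
--     s = str(flag_name or "").strip().upper()
--     out = []
--     for ch in s:
--         if "A" <= ch <= "Z" or "0" <= ch <= "9":
--             out.append(ch)
--         elif out and out[-1] != "_":
--             out.append("_")
--     return "".join(out).rstrip("_")
-- ===== Notes on version B (the rewrite author's own statement) =====
-- stated objective: simpler
-- what changed: Replaces the classify-then-repeated-replace('__','_')-fixpoint-then-strip('_') pipeline with a single fused loop that emits at most one '_' per run of non-alphanumerics and never a leading one, so only a final rstrip('_') remains.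
import Mathlib
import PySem

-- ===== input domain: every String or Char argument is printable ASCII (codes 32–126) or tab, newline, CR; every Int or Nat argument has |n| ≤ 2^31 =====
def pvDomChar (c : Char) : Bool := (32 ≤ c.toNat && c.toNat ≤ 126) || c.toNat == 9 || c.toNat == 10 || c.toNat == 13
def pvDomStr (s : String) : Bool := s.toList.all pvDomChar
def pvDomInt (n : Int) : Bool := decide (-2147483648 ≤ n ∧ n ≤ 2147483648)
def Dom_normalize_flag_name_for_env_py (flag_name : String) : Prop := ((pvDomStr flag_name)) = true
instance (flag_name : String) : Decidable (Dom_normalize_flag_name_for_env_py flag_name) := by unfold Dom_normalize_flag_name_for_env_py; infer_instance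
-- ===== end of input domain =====

-- B replaces A's classify / repeated replace("__","_") fixpoint / strip("_") pipeline by one
-- fused loop (emit at most one '_' per run, never a leading one) plus a final rstrip("_").

-- ===== PORT A =====

-- one pass of s.replace("__", "_") (CPython: non-overlapping, left to right);
-- used (via pvReplaceUnderscores_eq_rep1 below) only to justify termination of A's while loop
def pvRep1 : List Char → List Char
  | '_' :: '_' :: t => '_' :: pvRep1 t
  | c :: t => c :: pvRep1 t
  | [] => []

theorem pvRep1_length_le (s : List Char) : (pvRep1 s).length ≤ s.length := by
  induction s using pvRep1.induct <;> simp [pvRep1] <;> omega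

theorem pvRep1_cons (c : Char) (t : List Char) (hne : ¬ (c = '_' ∧ t.head? = some '_')) :
    pvRep1 (c :: t) = c :: pvRep1 t := by
  rw [pvRep1.eq_def]
  split
  · rename_i t' heq
    injection heq with h1 h2
    exact absurd ⟨h1, by rw [h2]; rfl⟩ hne
  · rename_i c' t' heq
    injection heq with h1 h2
    subst h1; subst h2; rfl
  · rename_i heq; simp at heq

theorem pvReplaceGo_eq_rep1 (fuel : Nat) (l acc : List Char) (h : l.length ≤ fuel) :
    PySem.Chars.replace.go ['_', '_'] ['_'] fuel l acc = acc.reverse ++ pvRep1 l := by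
  induction fuel generalizing l acc with
  | zero =>
    have : l = [] := by cases l <;> simp_all
    subst this; simp [PySem.Chars.replace.go, pvRep1]
  | succ f ih =>
    match l with
    | [] => simp [PySem.Chars.replace.go, pvRep1]
    | c :: t =>
      by_cases hcase : c = '_' ∧ t.head? = some '_'
      · obtain ⟨rfl, ht⟩ := hcase
        obtain ⟨t', rfl⟩ : ∃ t', t = '_' :: t' := by cases t <;> simp_all
        rw [PySem.Chars.replace.go]
        rw [if_pos (by simp [List.isPrefixOf])]
        simp only [List.length_cons] at h
        simp only [List.length_cons, List.length_nil, List.drop_succ_cons, List.drop_zero]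
        rw [ih t' _ (by omega)]
        simp [pvRep1]
      · rw [PySem.Chars.replace.go]
        have hp : (['_', '_'] : List Char).isPrefixOf (c :: t) = false := by
          cases t with
          | nil => simp [List.isPrefixOf]
          | cons d t' =>
            simp only [List.head?_cons, Option.some.injEq] at hcase
            simp [List.isPrefixOf]
            intro h1 h2
            exact hcase ⟨h1.symm, h2.symm⟩
        rw [if_neg (by simp [hp])]
        simp only [List.length_cons] at h
        rw [ih t (c :: acc) (by omega)]
        rw [pvRep1_cons c t hcase]
        simp

theorem pvReplaceUnderscores_eq_rep1 (s : List Char) :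
    PySem.Chars.replace s ['_', '_'] ['_'] = pvRep1 s := by
  rw [PySem.Chars.replace]
  simp [pvReplaceGo_eq_rep1 s.length s [] (le_refl _)]

theorem pvRep1_length_lt (s : List Char) (h : ['_', '_'] <:+: s) :
    (pvRep1 s).length < s.length := by
  induction s using pvRep1.induct with
  | case1 t ih =>
    have := pvRep1_length_le t
    simp [pvRep1]; omega
  | case2 c t hne ih =>
    have hne' : ¬ (c = '_' ∧ t.head? = some '_') := by
      rintro ⟨rfl, hh⟩
      cases t with
      | nil => simp at hh
      | cons d t' =>
        simp only [List.head?_cons, Option.some.injEq] at hh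
        exact hne t' rfl (by rw [hh])
    rw [List.infix_cons_iff] at h
    rcases h with h | h
    · exfalso
      obtain ⟨r, hr⟩ := h
      simp at hr
      exact hne' ⟨hr.1.symm, by rw [← hr.2]; rfl⟩
    · rw [pvRep1_cons c t hne']
      simp only [List.length_cons]
      exact Nat.succ_lt_succ (ih h)
  | case3 => simp at h

-- A's while "__" in normalized: normalized = normalized.replace("__", "_")
def pvFixA (s : List Char) : List Char :=
  if PySem.Chars.isIn ['_', '_'] s then pvFixA (PySem.Chars.replace s ['_', '_'] ['_']) else s
termination_by s.length
decreasing_by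
  rw [pvReplaceUnderscores_eq_rep1]
  exact pvRep1_length_lt s ((PySem.Chars.isIn_iff_infix _ _).mp (by assumption))

def normalize_flag_name_for_env_py (flag_name : String) : String :=
  -- for a str argument, (flag_name or "") is flag_name ("" if empty), and str() is identity
  let s := PySem.Chars.upper (PySem.Chars.strip flag_name.toList)
  let out := s.foldl (fun acc ch =>
      if ('A' ≤ ch ∧ ch ≤ 'Z') ∨ ('0' ≤ ch ∧ ch ≤ '9') then acc ++ [ch] else acc ++ ['_']) []
  let normalized := pvFixA out
  String.ofList (PySem.Chars.stripChars normalized ['_'])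

-- ===== PORT B =====
def normalize_flag_name_for_env_py_alt (flag_name : String) : String :=
  let s := PySem.Chars.upper (PySem.Chars.strip flag_name.toList)
  let out := s.foldl (fun acc ch =>
      if ('A' ≤ ch ∧ ch ≤ 'Z') ∨ ('0' ≤ ch ∧ ch ≤ '9') then acc ++ [ch]
      else if acc ≠ [] ∧ acc.getLast? ≠ some '_' then acc ++ ['_'] else acc) []
  -- "".join(out).rstrip("_"): drop the trailing run of '_' (exact for this single-char class)
  String.ofList ((out.reverse.dropWhile (fun c => c == '_')).reverse)

-- ===== PRECONDITION & SPEC =====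
def Spec_normalize_flag_name_for_env_py (flag_name : String) (out : String) : Prop := out = normalize_flag_name_for_env_py_alt flag_name
instance (flag_name : String) (out : String) : Decidable (Spec_normalize_flag_name_for_env_py flag_name out) := by unfold Spec_normalize_flag_name_for_env_py; infer_instance

-- ===== CLAIM (what is proved, stated in full; the proofs are below) =====
def Claim_equal_normalize_flag_name_for_env_py : Prop := ∀ (flag_name : String), Dom_normalize_flag_name_for_env_py flag_name → Spec_normalize_flag_name_for_env_py flag_name (normalize_flag_name_for_env_py flag_name)

-- ===== LEMMAS AND PROOFS =====

-- collapse runs of '_' in one pass; the flag records whether the last emitted char was '_'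
def pvColl : Bool → List Char → List Char
  | _, [] => []
  | b, c :: t =>
    if c = '_' then (if b then pvColl true t else '_' :: pvColl true t)
    else c :: pvColl false t

-- helper: the functional-induction side condition of pvRep1's catch-all arm, as a head? fact
theorem pvHeadNe (c : Char) (t : List Char)
    (hne : ∀ t', c = '_' → t = '_' :: t' → False) : ¬ (c = '_' ∧ t.head? = some '_') := by
  rintro ⟨rfl, hh⟩
  cases t with
  | nil => simp at hh
  | cons d t' =>
    simp only [List.head?_cons, Option.some.injEq] at hh
    exact hne t' rfl (by rw [hh])

theorem pvColl_rep1 (s : List Char) : ∀ b, pvColl b (pvRep1 s) = pvColl b s := by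
  induction s using pvRep1.induct with
  | case1 t ih => intro b; cases b <;> simp [pvRep1, pvColl, ih]
  | case2 c t hne ih =>
    intro b
    rw [pvRep1_cons c t (pvHeadNe c t hne)]
    by_cases hc : c = '_' <;> cases b <;> simp [pvColl, hc, ih]
  | case3 => intro b; simp [pvRep1]

theorem pvColl_of_no_doubles (s : List Char) (h : ¬ (['_', '_'] <:+: s)) :
    pvColl false s = s ∧ (s.head? ≠ some '_' → pvColl true s = s) := by
  induction s with
  | nil => simp [pvColl]
  | cons c t ih =>
    have ht : ¬ (['_', '_'] <:+: t) := fun hh => h (hh.trans (List.suffix_cons c t).isInfix)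
    constructor
    · by_cases hc : c = '_'
      · subst hc
        have hhead : t.head? ≠ some '_' := by
          intro hh
          apply h
          cases t with
          | nil => simp at hh
          | cons d t' =>
            simp only [List.head?_cons, Option.some.injEq] at hh
            subst hh
            exact List.IsPrefix.isInfix ⟨t', rfl⟩
        simp only [pvColl, Bool.false_eq_true, if_false]
        rw [(ih ht).2 hhead]
        simp
      · simp only [pvColl, if_neg hc]
        rw [(ih ht).1]
    · intro hh
      have hc : c ≠ '_' := fun hc => hh (by subst hc; rfl)
      simp only [pvColl, if_neg hc]
      rw [(ih ht).1]

theorem pvFixA_eq_coll (s : List Char) : pvFixA s = pvColl false s := by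
  induction s using pvFixA.induct with
  | case1 s h ih =>
    rw [pvFixA, if_pos h, ih, pvReplaceUnderscores_eq_rep1, pvColl_rep1]
  | case2 s h =>
    rw [pvFixA, if_neg h]
    have hni : ¬ (['_', '_'] <:+: s) := by
      rw [← PySem.Chars.isIn_iff_infix]
      simpa using h
    exact ((pvColl_of_no_doubles s hni).1).symm

def pvClassify (c : Char) : Char :=
  if ('A' ≤ c ∧ c ≤ 'Z') ∨ ('0' ≤ c ∧ c ≤ '9') then c else '_'

theorem pvClassify_ne (c : Char) (h : ('A' ≤ c ∧ c ≤ 'Z') ∨ ('0' ≤ c ∧ c ≤ '9')) : c ≠ '_' := by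
  rintro rfl
  revert h
  decide

theorem pvFoldA (u : List Char) : ∀ a : List Char,
    u.foldl (fun acc ch =>
      if ('A' ≤ ch ∧ ch ≤ 'Z') ∨ ('0' ≤ ch ∧ ch ≤ '9') then acc ++ [ch] else acc ++ ['_']) a
    = a ++ u.map pvClassify := by
  induction u with
  | nil => intro a; simp
  | cons c u ih =>
    intro a
    simp only [List.foldl_cons, List.map_cons]
    by_cases h : ('A' ≤ c ∧ c ≤ 'Z') ∨ ('0' ≤ c ∧ c ≤ '9')
    · rw [if_pos h, ih]; simp [pvClassify, h]
    · rw [if_neg h, ih]; simp [pvClassify, h]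

theorem pvFoldB_ne (u : List Char) : ∀ acc : List Char, acc ≠ [] →
    u.foldl (fun acc ch =>
      if ('A' ≤ ch ∧ ch ≤ 'Z') ∨ ('0' ≤ ch ∧ ch ≤ '9') then acc ++ [ch]
      else if acc ≠ [] ∧ acc.getLast? ≠ some '_' then acc ++ ['_'] else acc) acc
    = acc ++ pvColl (decide (acc.getLast? = some '_')) (u.map pvClassify) := by
  induction u with
  | nil => intro acc _; simp [pvColl]
  | cons c u ih =>
    intro acc hacc
    simp only [List.foldl_cons, List.map_cons]
    by_cases h : ('A' ≤ c ∧ c ≤ 'Z') ∨ ('0' ≤ c ∧ c ≤ '9')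
    · rw [if_pos h, ih (acc ++ [c]) (by simp)]
      have hc := pvClassify_ne c h
      simp [pvColl, pvClassify, h, hc]
    · rw [if_neg h]
      by_cases hl : acc.getLast? = some '_'
      · rw [if_neg (by simp [hl])]
        rw [ih acc hacc]
        simp [pvColl, pvClassify, h, hl]
      · rw [if_pos ⟨hacc, hl⟩]
        rw [ih (acc ++ ['_']) (by simp)]
        simp [pvColl, pvClassify, h, hl]

theorem pvDropWhile_coll (v : List Char) :
    (pvColl true v).dropWhile (fun c => c == '_') = (pvColl false v).dropWhile (fun c => c == '_') := by
  cases v with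
  | nil => rfl
  | cons c t => by_cases hc : c = '_' <;> simp [pvColl, hc]

theorem pvFoldB_nil (u : List Char) :
    u.foldl (fun acc ch =>
      if ('A' ≤ ch ∧ ch ≤ 'Z') ∨ ('0' ≤ ch ∧ ch ≤ '9') then acc ++ [ch]
      else if acc ≠ [] ∧ acc.getLast? ≠ some '_' then acc ++ ['_'] else acc) []
    = (pvColl false (u.map pvClassify)).dropWhile (fun c => c == '_') := by
  induction u with
  | nil => rfl
  | cons c u ih =>
    simp only [List.foldl_cons, List.map_cons]
    by_cases h : ('A' ≤ c ∧ c ≤ 'Z') ∨ ('0' ≤ c ∧ c ≤ '9')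
    · rw [if_pos h]
      have hc := pvClassify_ne c h
      rw [show ([] : List Char) ++ [c] = [c] from rfl, pvFoldB_ne u [c] (by simp)]
      simp [pvColl, pvClassify, h, hc]
    · rw [if_neg h, if_neg (by simp), ih]
      rw [show pvClassify c = '_' from by simp [pvClassify, h]]
      rw [show pvColl false ('_' :: u.map pvClassify) = '_' :: pvColl true (u.map pvClassify)
            from by simp [pvColl]]
      rw [List.dropWhile_cons_of_pos (by simp)]
      exact (pvDropWhile_coll (u.map pvClassify)).symm

theorem pvContains_underscore :
    (fun c => (['_'] : List Char).contains c) = (fun c : Char => c == '_') := by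
  funext c
  by_cases h : c = '_' <;> simp [h]

theorem normalize_flag_name_for_env_py_spec : Claim_equal_normalize_flag_name_for_env_py := by
  intro flag_name _
  unfold Spec_normalize_flag_name_for_env_py
  unfold normalize_flag_name_for_env_py normalize_flag_name_for_env_py_alt
  simp only [pvFoldA, List.nil_append, pvFoldB_nil, pvFixA_eq_coll,
    PySem.Chars.stripChars, pvContains_underscore]
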